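-- pv_equiv track=rewrite | github.com/RuleIQ-Vercel-Deploy/ruleIQ | fix_final_tests.py | fix_class_references
-- ===== SOURCE A (Python) =====
-- def fix_class_references(content):
--     """Fix references to renamed/moved classes."""
--     replacements = [
--         ('CostEntry', 'AIUsageMetrics'),
--         ('TokenBlacklistService', 'TokenBlacklist'),
--     ]
--
--     for old, new in replacements:
--         # Only replace if it's not in an import statement
--         lines = content.split('\n')
--         fixed_lines = []
--         for line in lines:
--             if 'import' not in line and old in line:
--                 line = line.replace(old, new)
--             fixed_lines.append(line)
--         content = '\n'.join(fixed_lines)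
--
--     return content
-- ===== SOURCE B (Python) =====
-- def fix_class_references(content):
--     """Fix references to renamed/moved classes."""
--     replacements = [
--         ('CostEntry', 'AIUsageMetrics'),
--         ('TokenBlacklistService', 'TokenBlacklist'),
--     ]
--     fixed_lines = []
--     for line in content.split('\n'):
--         for old, new in replacements:
--             if 'import' not in line and old in line:
--                 line = line.replace(old, new)
--         fixed_lines.append(line)
--     return '\n'.join(fixed_lines)
-- ===== Notes on version B (the rewrite author's own statement) =====
-- stated objective: simpler
-- what changed: A runs one full split/rebuild pass over the whole text per replacement pair (split, per-line fix, join, then split the rebuilt text again for the next pair); B splits the text into lines exactly once, applies all replacements to each line in a single pass, and joins once.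
import Mathlib
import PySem

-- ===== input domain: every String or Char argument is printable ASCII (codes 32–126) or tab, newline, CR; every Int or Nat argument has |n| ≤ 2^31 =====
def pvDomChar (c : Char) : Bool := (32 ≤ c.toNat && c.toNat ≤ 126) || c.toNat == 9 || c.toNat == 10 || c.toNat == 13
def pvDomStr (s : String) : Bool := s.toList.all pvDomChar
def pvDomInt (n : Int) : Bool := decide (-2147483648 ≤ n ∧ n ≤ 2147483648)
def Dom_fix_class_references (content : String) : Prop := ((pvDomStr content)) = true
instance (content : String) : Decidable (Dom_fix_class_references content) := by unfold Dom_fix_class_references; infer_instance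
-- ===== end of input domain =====

-- B replaces A's two full split/fix/join passes over the text (one per replacement pair)
-- by a single split, one pass over the lines applying both replacements, and a single join.

-- ===== PORT A =====
def fix_class_references (content : String) : String :=
  String.ofList
    ([("CostEntry".toList, "AIUsageMetrics".toList),
      ("TokenBlacklistService".toList, "TokenBlacklist".toList)].foldl
      (fun cont p =>
        let lines := PySem.Chars.splitOn cont ['\n']
        let fixed_lines := lines.foldl
          (fun acc line =>
            acc ++ [if !PySem.Chars.isIn "import".toList line && PySem.Chars.isIn p.1 line
                    then PySem.Chars.replace line p.1 p.2 else line]) []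
        PySem.Chars.join ['\n'] fixed_lines)
      content.toList)

-- ===== PORT B =====
def pvFixLine (line : List Char) : List Char :=
  [("CostEntry".toList, "AIUsageMetrics".toList),
   ("TokenBlacklistService".toList, "TokenBlacklist".toList)].foldl
    (fun l p =>
      if !PySem.Chars.isIn "import".toList l && PySem.Chars.isIn p.1 l
      then PySem.Chars.replace l p.1 p.2 else l) line

def fix_class_references_alt (content : String) : String :=
  String.ofList (PySem.Chars.join ['\n']
    ((PySem.Chars.splitOn content.toList ['\n']).map pvFixLine))

-- ===== PRECONDITION & SPEC =====
def Spec_fix_class_references (content : String) (out : String) : Prop := out = fix_class_references_alt content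
instance (content : String) (out : String) : Decidable (Spec_fix_class_references content out) := by unfold Spec_fix_class_references; infer_instance

-- ===== CLAIM (what is proved, stated in full; the proofs are below) =====
def Claim_equal_fix_class_references : Prop := ∀ (content : String), Dom_fix_class_references content → Spec_fix_class_references content (fix_class_references content)

-- ===== LEMMAS AND PROOFS =====

-- one fix pass over a single line, for one replacement pair
def pvStep (old new line : List Char) : List Char :=
  if !PySem.Chars.isIn "import".toList line && PySem.Chars.isIn old line
  then PySem.Chars.replace line old new else line

theorem pvModifyHead_id {α : Type} (l : List α) : List.modifyHead (fun x => x) l = l := by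
  cases l <;> rfl

theorem pvSplitOnGo_eq (ch : Char) : ∀ (fuel : Nat) (l cur : List Char) (acc : List (List Char)),
    l.length ≤ fuel →
    PySem.Chars.splitOn.go [ch] fuel l cur acc
      = acc.reverse ++ (List.splitOn ch l).modifyHead (cur.reverse ++ ·) := by
  intro fuel
  induction fuel with
  | zero =>
    intro l cur acc h
    have : l = [] := List.eq_nil_of_length_eq_zero (Nat.le_zero.mp h)
    subst this
    simp [PySem.Chars.splitOn.go, List.splitOn, List.splitOnP_nil]
  | succ n ih =>
    intro l cur acc h
    cases l with
    | nil => simp [PySem.Chars.splitOn.go, List.splitOn, List.splitOnP_nil]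
    | cons c0 rest =>
      simp only [PySem.Chars.splitOn.go]
      by_cases hc : c0 = ch
      · subst hc
        have hpre : [c0].isPrefixOf (c0 :: rest) = true := by simp [List.isPrefixOf]
        rw [if_pos hpre]
        rw [ih _ _ _ (by simpa using Nat.le_of_succ_le_succ h)]
        simp [List.splitOn, List.splitOnP_cons, pvModifyHead_id]
      · have hpre : [ch].isPrefixOf (c0 :: rest) = false := by
          simp [List.isPrefixOf]; exact fun hh => absurd hh.symm hc
        rw [if_neg (by simp [hpre])]
        rw [ih _ _ _ (by simpa using Nat.le_of_succ_le_succ h)]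
        simp only [List.splitOn, List.splitOnP_cons]
        rw [if_neg (by simp [hc])]
        rw [List.modifyHead_modifyHead]
        have hfun : (fun x => (c0 :: cur).reverse ++ x)
            = ((fun x => cur.reverse ++ x) ∘ List.cons c0) := by
          funext x; simp
        rw [hfun]

-- PySem's split('\n') is core List.splitOn
theorem pvSplitOn_eq (ch : Char) (cs : List Char) :
    PySem.Chars.splitOn cs [ch] = List.splitOn ch cs := by
  show PySem.Chars.splitOn.go [ch] (cs.length + 1) cs [] [] = _
  rw [pvSplitOnGo_eq ch (cs.length + 1) cs [] [] (by omega)]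
  simp [pvModifyHead_id]

-- pieces of split('\n') contain no '\n'
theorem pvSplitOn_not_mem (ch : Char) : ∀ (cs : List Char), ∀ piece ∈ List.splitOn ch cs, ch ∉ piece := by
  intro cs
  induction cs with
  | nil => intro piece hp; simp [List.splitOn, List.splitOnP_nil] at hp; simp [hp]
  | cons x rest ih =>
    intro piece hp
    simp only [List.splitOn, List.splitOnP_cons] at hp ih
    by_cases hx : x = ch
    · rw [if_pos (by simp [hx])] at hp
      rcases List.mem_cons.mp hp with h | h
      · simp [h]
      · exact ih piece h
    · rw [if_neg (by simp [hx])] at hp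
      cases hS : List.splitOnP (fun c => c == ch) rest with
      | nil => exact absurd hS (List.splitOnP_ne_nil _ _)
      | cons s0 S' =>
        rw [hS] at hp ih
        simp only [List.modifyHead] at hp
        rcases List.mem_cons.mp hp with h | h
        · subst h
          intro hmem
          rcases List.mem_cons.mp hmem with h' | h'
          · exact hx h'.symm
          · exact ih s0 (List.mem_cons_self) h'
        · exact ih piece (List.mem_cons_of_mem _ h)

-- every char of replace's result comes from the accumulator, the input, or the replacement
theorem pvReplaceGo_mem (old new : List Char) (x : Char) :
    ∀ (fuel : Nat) (l acc : List Char),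
    x ∈ PySem.Chars.replace.go old new fuel l acc → x ∈ acc ∨ x ∈ l ∨ x ∈ new := by
  intro fuel
  induction fuel with
  | zero =>
    intro l acc h
    simp only [PySem.Chars.replace.go] at h
    rcases List.mem_append.mp h with h | h
    · exact Or.inl (List.mem_reverse.mp h)
    · exact Or.inr (Or.inl h)
  | succ n ih =>
    intro l acc h
    cases l with
    | nil =>
      simp only [PySem.Chars.replace.go] at h
      exact Or.inl (List.mem_reverse.mp h)
    | cons c t =>
      simp only [PySem.Chars.replace.go] at h
      split at h
      · rcases ih _ _ h with h' | h' | h'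
        · rcases List.mem_append.mp h' with h'' | h''
          · exact Or.inr (Or.inr (List.mem_reverse.mp h''))
          · exact Or.inl h''
        · exact Or.inr (Or.inl (List.mem_of_mem_drop h'))
        · exact Or.inr (Or.inr h')
      · rcases ih _ _ h with h' | h' | h'
        · rcases List.mem_cons.mp h' with h'' | h''
          · exact Or.inr (Or.inl (by simp [h'']))
          · exact Or.inl h''
        · exact Or.inr (Or.inl (List.mem_cons_of_mem _ h'))
        · exact Or.inr (Or.inr h')

theorem pvReplace_not_mem (old new l : List Char) (ch : Char)
    (hl : ch ∉ l) (hnew : ch ∉ new) : ch ∉ PySem.Chars.replace l old new := by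
  unfold PySem.Chars.replace
  split
  · intro h
    rcases List.mem_append.mp h with h | h
    · exact hnew h
    · rcases List.mem_flatMap.mp h with ⟨c, hc, hm⟩
      rcases List.mem_cons.mp hm with h' | h'
      · exact hl (h' ▸ hc)
      · exact hnew h'
  · intro h
    rcases pvReplaceGo_mem old new ch _ _ _ h with h' | h' | h'
    · simp at h'
    · exact hl h'
    · exact hnew h'

theorem pvStep_not_mem (old new l : List Char) (ch : Char)
    (hl : ch ∉ l) (hnew : ch ∉ new) : ch ∉ pvStep old new l := by
  unfold pvStep
  split
  · exact pvReplace_not_mem old new l ch hl hnew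
  · exact hl

-- one of A's passes, written as intercalate ∘ map
theorem pvPass_eq (old new cont : List Char) :
    PySem.Chars.join ['\n']
      ((PySem.Chars.splitOn cont ['\n']).foldl
        (fun acc line =>
          acc ++ [if !PySem.Chars.isIn "import".toList line && PySem.Chars.isIn old line
                  then PySem.Chars.replace line old new else line]) [])
      = ['\n'].intercalate ((List.splitOn '\n' cont).map (pvStep old new)) := by
  rw [pvSplitOn_eq, PySem.List.foldl_append_singleton_eq_map]
  rfl

theorem pvMain (content : String) :
    fix_class_references content = fix_class_references_alt content := by
  unfold fix_class_references fix_class_references_alt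
  simp only [List.foldl_cons, List.foldl_nil]
  rw [pvPass_eq, pvPass_eq]
  have hL1 : ∀ l ∈ (List.splitOn '\n' content.toList).map
      (pvStep "CostEntry".toList "AIUsageMetrics".toList), '\n' ∉ l := by
    intro l hl
    rcases List.mem_map.mp hl with ⟨line, hline, rfl⟩
    exact pvStep_not_mem _ _ _ _ (pvSplitOn_not_mem '\n' content.toList line hline) (by decide)
  have hne : (List.splitOn '\n' content.toList).map
      (pvStep "CostEntry".toList "AIUsageMetrics".toList) ≠ [] := by
    intro h
    exact List.splitOnP_ne_nil _ _ (List.map_eq_nil_iff.mp h)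
  rw [List.splitOn_intercalate _ '\n' hL1 hne]
  rw [pvSplitOn_eq, List.map_map]
  have hfix : (pvStep "TokenBlacklistService".toList "TokenBlacklist".toList ∘
      pvStep "CostEntry".toList "AIUsageMetrics".toList) = pvFixLine := by
    funext line
    simp [pvFixLine, pvStep, List.foldl_cons, List.foldl_nil]
  rw [hfix]
  rfl

-- ===== VERDICT (by name: the statement is the Claim_ definition above) =====
theorem fix_class_references_spec : Claim_equal_fix_class_references := by
  intro content _
  unfold Spec_fix_class_references
  exact pvMain content
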